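-- pv_equiv track=rewrite | github.com/katieMlyons/bioinf_algorithms | src/dna.py | skew
-- ===== SOURCE A (Python) =====
-- def skew(string:str) -> list[int]:
--     '''running score of G - C skew across genome'''
--     skewcount = 0
--     skewlist = []
--     skewlist.append(skewcount)
--     for char in string:
--         if char == "G":
--             skewcount += 1
--         elif char == "C":
--             skewcount -= 1
--         skewlist.append(skewcount)
--     return skewlist
-- ===== SOURCE B (Python) =====
-- def skew(string: str) -> list[int]:
--     '''running score of G - C skew across genome'''
--     # divide and conquer: the skew list of s = left+right is the skew list of left,
--     # followed by the skew list of right (minus its leading 0) shifted by left's final skew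
--     if len(string) == 0:
--         return [0]
--     if len(string) == 1:
--         return [0, 1 if string == "G" else -1 if string == "C" else 0]
--     m = len(string) // 2
--     left = skew(string[:m])
--     right = skew(string[m:])
--     off = left[-1]
--     return left + [off + x for x in right[1:]]
-- ===== Notes on version B (the rewrite author's own statement) =====
-- stated objective: alternative
-- what changed: Replaced A's forward loop with a running accumulator by a divide-and-conquer recursion: split the string in half, compute each half's skew list, and append the right list (minus its leading 0) shifted by the left list's final value.
import Mathlib
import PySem

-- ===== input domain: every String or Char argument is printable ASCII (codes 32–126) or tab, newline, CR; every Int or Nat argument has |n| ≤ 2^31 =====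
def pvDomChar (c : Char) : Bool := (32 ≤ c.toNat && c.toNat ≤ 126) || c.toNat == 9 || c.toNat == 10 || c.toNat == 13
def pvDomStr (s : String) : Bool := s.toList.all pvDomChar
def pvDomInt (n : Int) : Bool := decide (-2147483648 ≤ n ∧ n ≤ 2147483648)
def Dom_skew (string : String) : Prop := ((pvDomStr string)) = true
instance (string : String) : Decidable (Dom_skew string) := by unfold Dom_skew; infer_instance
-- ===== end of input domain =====

-- B replaces A's forward accumulator loop by a divide-and-conquer recursion (halve, solve, append right's list shifted by left's final value); alternative algorithm, not claimed faster.


-- ===== PORT A =====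
-- literal port of A: state (skewcount, skewlist), skewlist starts as [0], append after each char
def skewStep (st : Int × List Int) (c : Char) : Int × List Int :=
  let cnt := if c = 'G' then st.1 + 1 else if c = 'C' then st.1 - 1 else st.1
  (cnt, st.2 ++ [cnt])

def skew (string : String) : List Int :=
  (string.toList.foldl skewStep (0, [0])).2

-- ===== PORT B =====
-- divide and conquer on the character list: halve (take/drop = Python's slices), recurse,
-- append the right half's list minus its leading 0, shifted by the left list's last element
def skewDC (l : List Char) : List Int :=
  match l with
  | [] => [0]
  | [c] => [0, if c = 'G' then 1 else if c = 'C' then -1 else 0]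
  | c1 :: c2 :: rest =>
    let m := (c1 :: c2 :: rest).length / 2
    let L := skewDC ((c1 :: c2 :: rest).take m)
    let R := skewDC ((c1 :: c2 :: rest).drop m)
    let off := L.getLastD 0          -- L[-1]; L is always nonempty
    L ++ R.tail.map (fun x => off + x)
termination_by l.length
decreasing_by
  · simp [List.length_take]; omega
  · simp [List.length_drop]; omega

def skew_alt (string : String) : List Int :=
  skewDC string.toList

-- ===== PRECONDITION & SPEC =====
def Spec_skew (string : String) (out : List Int) : Prop := out = skew_alt string
instance (string : String) (out : List Int) : Decidable (Spec_skew string out) := by unfold Spec_skew; infer_instance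

-- ===== CLAIM (what is proved, stated in full; the proofs are below) =====
def Claim_equal_skew : Prop := ∀ (string : String), Dom_skew string → Spec_skew string (skew string)

-- ===== LEMMAS AND PROOFS =====
-- common reference point: the prefix-sum (scanl) of the per-character deltas
def skewDelta (c : Char) : Int := if c = 'G' then 1 else if c = 'C' then -1 else 0

-- A's loop appends the running sums: its list is lst ++ tail of the scanl from acc
theorem skew_foldl_scanl (l : List Char) (acc : Int) (lst : List Int) :
    (List.foldl skewStep (acc, lst) l).2
      = lst ++ (List.scanl (· + ·) acc (l.map skewDelta)).tail := by
  induction l generalizing acc lst with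
  | nil => simp
  | cons c cs ih =>
    have hc : (if c = 'G' then acc + 1 else if c = 'C' then acc - 1 else acc)
        = acc + skewDelta c := by
      unfold skewDelta; split_ifs <;> ring
    simp only [List.foldl_cons, List.map_cons, List.scanl_cons, List.tail_cons, skewStep, hc]
    rw [ih]
    cases List.map skewDelta cs <;> simp

-- shifting the start of a scanl shifts every entry
theorem scanl_shift (l : List Int) (x : Int) :
    List.scanl (· + ·) x l = (List.scanl (· + ·) 0 l).map (· + x) := by
  induction l generalizing x with
  | nil => simp
  | cons d ds ih =>
    simp only [List.scanl_cons, List.map_cons, zero_add]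
    refine congrArg (x :: ·) ?_
    rw [ih (x + d), ih d, List.map_map]
    apply List.map_congr_left
    intro a _
    simp [Function.comp]; ring

-- the last entry of a scanl of (+) is the start plus the sum
theorem scanl_getLastD (l : List Int) (a d : Int) :
    (List.scanl (· + ·) a l).getLastD d = a + l.sum := by
  induction l generalizing a d with
  | nil => simp
  | cons x xs ih =>
    simp only [List.scanl_cons, List.getLastD_cons, ih, List.sum_cons]
    ring

-- scanl over an append splits into the left scanl and the shifted right scanl's tail
theorem scanl_append (u v : List Int) (a : Int) :
    List.scanl (· + ·) a (u ++ v)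
      = List.scanl (· + ·) a u ++ (List.scanl (· + ·) (a + u.sum) v).tail := by
  induction u generalizing a with
  | nil => cases v <;> simp
  | cons d ds ih =>
    simp only [List.cons_append, List.scanl_cons, List.sum_cons]
    rw [ih]
    have : a + d + ds.sum = a + (d + ds.sum) := by ring
    rw [this]

-- tail commutes with map
theorem map_tail_comm (f : Int → Int) (l : List Int) : (l.map f).tail = l.tail.map f := by
  cases l <;> simp

-- the tail of a shifted scanl is the shifted tail of the scanl from 0
theorem scanl_tail_shift (v : List Int) (s : Int) :
    (List.scanl (· + ·) s v).tail = (List.scanl (· + ·) 0 v).tail.map (fun x => s + x) := by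
  rw [scanl_shift v s, map_tail_comm]
  apply List.map_congr_left
  intro x _
  ring

-- B's divide-and-conquer equals the scanl of the deltas
theorem skewDC_scanl (l : List Char) :
    skewDC l = List.scanl (· + ·) 0 (l.map skewDelta) := by
  induction l using skewDC.induct with
  | case1 => simp [skewDC]
  | case2 c => simp [skewDC, skewDelta]
  | case3 c1 c2 rest m ih1 ih2 =>
    simp only [skewDC]
    have hm : m = (c1 :: c2 :: rest).length / 2 := rfl
    rw [hm] at ih1 ih2
    rw [ih1, ih2, scanl_getLastD]
    have hsplit : (c1 :: c2 :: rest)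
        = (c1 :: c2 :: rest).take ((c1 :: c2 :: rest).length / 2)
          ++ (c1 :: c2 :: rest).drop ((c1 :: c2 :: rest).length / 2) :=
      (List.take_append_drop _ _).symm
    conv_rhs => rw [hsplit]
    rw [List.map_append, scanl_append, scanl_tail_shift]
    conv_rhs => rw [scanl_tail_shift]
    simp

-- ===== VERDICT (by name: the statement is the Claim_ definition above) =====
theorem skew_spec : Claim_equal_skew := by
  intro s _
  unfold Spec_skew skew skew_alt
  rw [skew_foldl_scanl, skewDC_scanl]
  cases h : (s.toList.map skewDelta) with
  | nil => simp
  | cons d ds => simp
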